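/- GENERATED by mk_final_copies.py from the proof of the farm's unit `start_decoder.C9a` (farm:start_decoder.C9a.1: Proof.lean) as the
   re-elaboration sweep compiled it — do not edit. -/
import Asan.CheckWalk
import Vorbis.Spec.Units.start_decoder_C9a
import Vorbis.Spec.StartDecoderCarry

open X86 X86.User Asan Vorbis Vorbis.Spec Vorbis.Spec.StartDecoder

set_option maxRecDepth 100000
set_option maxHeartbeats 4000000

namespace Vorbis.Spec.start_decoder_C9a

/-- Segment C9a: `mov rdi, r14 ; call compute_accelerated_huffman` and the callee, from `AtC9` to the return address 0x11472c.
The carry: `MInv.push` over the pushed return address (the callee's `AccelPre` is stated for that memory), `MInv.step` over the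
callee's footprint (96 bytes of stack, fast_huffman `[c + 48, c + 2096)`), K1 – K4c by `BookFields.of_step0`, K5 from the post. -/
theorem c9a_walk : Vorbis.Spec.start_decoder_C9a.Statement := by
  intro Lay hLay μ hμ u₀ hcode h_accel
  intro g i v hat
  obtain ⟨A, A2, A3, Ai, h⟩ := hat
  have hfr := h.frame
  have hhand := h.cur.hand
  have he := hfr.entry
  v_entry he
  simp only [depth] at he_room he_stack
  have w_rip := hfr.rip
  have w_rsp := hfr.rsp
  have w_r14 := h.cur.r14
  have w_eq : Mem.EqOn Vorbis.L.textLo Vorbis.L.textHi u₀.mem v.mem := hfr.code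
  have hdf : v.flags .df = false := (show abiInv _ from hfr.inv).1
  have hmx : v.mxcsr &&& 0x1F80 = 0x1F80 := (show abiInv _ from hfr.inv).2
  have hsse := Vorbis.sseOK_of_abiInv hfr.inv
  -- the invariant of the segment, the positions
  have hpos : Pos g A := Pos.of hfr h.cur
  have hm0 : MInv g i A2 A3 Ai A v.mem := MInv.of hfr h.cur
  have hcw := hm0.c_where
  obtain ⟨c, hc⟩ : ∃ c, g.cb v.mem i = c := ⟨_, rfl⟩
  rw [hc] at w_r14 hcw
  have hR : (v.reg .rsp).toNat = g.R := by
    have h2 := hpos.ra_hi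
    have h1 := hpos.r_eq
    rw [w_rsp, toNat_addr _ (by omega)]
  have hRsp : (v.reg .rsp).toNat + 1480 = (g.e.reg .rsp).toNat := by
    have h1 := hpos.r_eq
    simp only [Ghost.RA] at h1
    omega
  have haccel := h_accel A.2 g.frames' A.1.Blk
  have c_r14 := w_r14
  u_walk hcode [hμ.vendor] until [Vorbis.L.start_decoder.cut118] span [Vorbis.L.textLo, Vorbis.L.textHi] side (v_side)
  case call_inv => v_inv
  case pre_114727 =>
    -- the push of the return address is a step of the segment
    have hp1 := hm0.push hpos (v.reg .rsp - 8) 1132332 (by u_omega)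
    rw [← w_mem] at hp1
    obtain ⟨hm1, hcb1⟩ := hp1
    rw [hc] at hcb1
    have hrdi : (s_114727.reg .rdi).toNat = c := by
      rw [w_rdi]
      exact toNat_addr _ (by omega)
    have hsh : ShadowPre A.2 g.frames' s_114727 := by
      refine ⟨?_, hfr.offText⟩
      have e : (s_114727.reg .rsp).toNat + 8 = g.R := by
        rw [w_rsp]
        u_omega
      rw [e]
      exact hm1.shadow
    have hlive : BlkLive A.1.Blk (Live (stackObjs g.frames' ++ A.2)) :=
      fun B hB => hm1.sd.env.live B (up g A B hB)
    have hcbOK := hm1.ages.cbOK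
    have hci := hcbOK.cb_in i hm1.lt
    have hcb1' := hcb1
    unfold Ghost.cb at hcb1'
    rw [hcb1'] at hci
    -- K1 – K4 in the memory after the push
    have hun : ShadowUntouched v.mem s_114727.mem := by v_untouched
    have hsx : Mem.SameExcept [⟨g.R - 8, g.R⟩] v.mem s_114727.mem := by
      rw [w_mem]
      apply Mem.SameExcept.writeLE
      · u_omega
      · refine ⟨_, List.mem_cons_self, ?_, ?_⟩
        · simp only []
          u_omega
        · simp only []
          u_omega
    have hq : ∀ w, w ∈ [(⟨g.R - 8, g.R⟩ : Span)] → OkWin0 g c w := by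
      intro w hw
      rw [List.mem_singleton.mp hw]
      left
      simp only []
      omega
    have hflds : BookFields v.mem s_114727.mem c := by
      apply BookFields.of_step0 hm0 hpos hc hsx hq
      intro w hw h1 h2
      rw [List.mem_singleton.mp hw] at h1 h2
      simp only [] at h1 h2
      have := hpos.ar_stack
      have := hpos.ra_hi
      have := hpos.r_eq
      have := hpos.ra_lo
      omega
    have hsv : 1 ≤ Codebook.sorted_entries v.mem c → (Codebook.svBlock v.mem c).Kept v.mem s_114727.mem := by
      intro hse
      have hS := h.k4.sv (by rw [hc]; exact hse)
      rw [hc] at hS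
      exact young_kept0 hm0 hpos hsx (by rw [hc]; exact hq) hS
    show AccelPre A.2 g.frames' A.1.Blk s_114727
    refine ⟨hsh, hlive, ?_, ?_, ?_, ?_, ?_⟩
    · rw [hrdi]
      exact ⟨_, hcbOK.F2.mono hm1.ages.exti, hci⟩
    · rw [hrdi]
      exact hflds.k1 (by rw [← hc]; exact h.k1)
    · rw [hrdi]
      exact hflds.k2 (by rw [← hc]; exact h.k2)
    · rw [hrdi]
      exact hflds.k3 (K3.mono (by rw [← hc]; exact h.k3) (fun B (hB : Since Ai A.1 B) => hB.1))
    · rw [hrdi]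
      exact hflds.k4 (K4.mono (by rw [← hc]; exact h.k4) (fun B (hB : Since Ai A.1 B) => hB.1)) hsv
  case cont =>
    obtain ⟨hunp, hk5⟩ := w_post
    simp only [X86.User.Spec.footprint, vspec, w_rsp_114727, w_rdi_114727] at w_same
    -- from the cut point to the returned state in ONE footprint: the push, then the callee's windows
    have hcT : (addr c).toNat = c := toNat_addr _ (by omega)
    have hun0 : ShadowUntouched v.mem s_114727.mem := by v_untouched
    have hsx : Mem.SameExcept [⟨g.R - 8, g.R⟩] v.mem s_114727.mem := by
      rw [w_mem_114727]
      apply Mem.SameExcept.writeLE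
      · u_omega
      · refine ⟨_, List.mem_cons_self, ?_, ?_⟩
        · simp only []
          u_omega
        · simp only []
          u_omega
    have hall : Mem.SameExcept [⟨g.R - 104, g.R⟩, ⟨c + 48, c + 2096⟩] v.mem s_114727r.mem := by
      apply Mem.SameExcept.trans
      · apply hsx.mono
        intro w hw a h1 h2
        rw [List.mem_singleton.mp hw] at h1 h2
        simp only [] at h1 h2
        exact ⟨_, List.mem_cons_self, by simp only []; omega, by simp only []; omega⟩
      · apply w_same.mono
        intro w hw a h1 h2
        simp only [List.mem_cons, List.mem_nil_iff, or_false] at hw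
        rcases hw with rfl | rfl
        · simp only [] at h1 h2
          refine ⟨_, List.mem_cons_self, ?_, ?_⟩
          · simp only []
            u_omega
          · simp only []
            u_omega
        · simp only [] at h1 h2
          refine ⟨_, List.mem_cons_of_mem _ List.mem_cons_self, ?_, ?_⟩
          · simp only []
            omega
          · simp only []
            omega
    have hunAll : ShadowUntouched v.mem s_114727r.mem := Mem.EqOn.trans hun0 hunp
    have hq : ∀ w, w ∈ [(⟨g.R - 104, g.R⟩ : Span), ⟨c + 48, c + 2096⟩] → OkWin0 g c w := by
      intro w hw
      simp only [List.mem_cons, List.mem_nil_iff, or_false] at hw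
      unfold OkWin0
      rcases hw with rfl | rfl
      · left
        simp only []
        omega
      · right
        right
        right
        left
        simp only []
        omega
    have hb1 : Bits (g.Blk A) g.len s_114727r.mem g.f := by
      apply bits_kept hpos hm0.sd.bits hall
      intro w hw
      simp only [List.mem_cons, List.mem_nil_iff, or_false] at hw
      rcases hw with rfl | rfl
      · left
        simp only []
        omega
      · right
        left
        simp only []
        omega
    obtain ⟨hm2, hcb2⟩ := hm0.step hpos hc hall hunAll (fun w hw => (hq w hw).ok) hb1
    have hflds : BookFields v.mem s_114727r.mem c := by
      apply BookFields.of_step0 hm0 hpos hc hall hq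
      intro w hw h1 h2
      simp only [List.mem_cons, List.mem_nil_iff, or_false] at hw
      have := hpos.ar_stack
      have := hpos.ra_hi
      have := hpos.r_eq
      have := hpos.ra_lo
      rcases hw with rfl | rfl
      · simp only [] at h1 h2
        omega
      · simp only [] at h1 h2 ⊢
        omega
    have hsv : 1 ≤ Codebook.sorted_entries v.mem c → (Codebook.svBlock v.mem c).Kept v.mem s_114727r.mem := by
      intro hse
      have hS := h.k4.sv (by rw [hc]; exact hse)
      rw [hc] at hS
      exact young_kept0 hm0 hpos hall (by rw [hc]; exact hq) hS
    have hk5' : Codebook.K5 s_114727r.mem c := by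
      rw [w_rdi_114727, hcT] at hk5
      exact hk5
    apply ReachVia.done
    refine ⟨A, A2, A3, Ai, ?_⟩
    have hcode' : CodeOK u₀ s_114727r.mem := Vorbis.conv_code_eqOn w_code
    have hinv' : abiInv s_114727r := w_inv
    refine
      { frame := hm2.frame hfr w_rip (by rw [w_rsp]; exact hfr.rsp) hcode' hinv' hfr.offText hfr.ext
        cur := hm2.cur hhand (by rw [hcb2, w_kept.get .r14 rfl]; exact c_r14)
        k := ?_
        noTemps := h.noTemps
        fresh := ?_ }
    · rw [hcb2]
      exact ⟨hflds.k1 (by rw [← hc]; exact h.k1), hflds.k2 (by rw [← hc]; exact h.k2), hflds.k3 (by rw [← hc]; exact h.k3),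
        hflds.k4 (by rw [← hc]; exact h.k4) hsv, hflds.k4c (by rw [← hc]; exact h.k4c) hsv, hk5'⟩
    · rw [hcb2]
      have hE : Mem.EqOn (c + 24) (c + 27) v.mem s_114727r.mem := by
        apply hall.eqOn
        intro w hw
        simp only [List.mem_cons, List.mem_nil_iff, or_false] at hw
        have := hpos.ar_stack
        have := hpos.ra_hi
        have := hpos.r_eq
        have := hpos.ra_lo
        rcases hw with rfl | rfl
        · simp only []
          omega
        · simp only []
          omega
      refine ⟨?_, ?_, ?_⟩
      · have h0 := h.fresh.lookup_type
        rw [hc] at h0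
        simp only [vacc, voff] at h0 ⊢
        rw [hE.u8 _ (by omega) (by omega) (by omega)]
        exact h0
      · rw [hflds.lookup_values, ← hc]
        exact h.fresh.lookup_values
      · rw [hflds.multiplicands, ← hc]
        exact h.fresh.multiplicands

end Vorbis.Spec.start_decoder_C9a

theorem Vorbis.Spec.Worked.start_decoder_C9a_ok : Vorbis.Spec.start_decoder_C9a.Statement := Vorbis.Spec.start_decoder_C9a.c9a_walk
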